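-- pv_equiv track=rewrite | github.com/ArnavGuptaaa/leets | leetcode/1807_Evaluate_the_Bracket_Pairs_of_a_String.py | evaluate
-- ===== SOURCE A (Python) =====
-- from typing import List
--
-- def evaluate(s: str, knowledge: List[List[str]]) -> str:
--     knowledge_map = {}
--
--     for [key, value] in knowledge:
--         knowledge_map[key] = value
--
--     idx = 0
--     stack = []
--
--     while idx < len(s):
--         if s[idx] == '(':
--             key = ''
--             idx += 1
--
--             while s[idx] != ')':
--                 key += s[idx]
--
--                 idx += 1
--
--             if key in knowledge_map:
--                 stack.append(knowledge_map[key])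
--             else:
--                 stack.append('?')
--
--             idx += 1
--             continue
--
--         stack.append(s[idx])
--         idx += 1
--
--     return "".join(stack)
-- ===== SOURCE B (Python) =====
-- import re
-- from typing import List
--
-- def evaluate(s: str, knowledge: List[List[str]]) -> str:
--     knowledge_map = dict(knowledge)
--     return re.sub(r'\(([^)]*)\)', lambda m: knowledge_map.get(m.group(1), '?'), s)
-- ===== Notes on version B (the rewrite author's own statement) =====
-- stated objective: idiomatic
-- what changed: A's explicit index-walking while-loop with an inner key-accumulation loop and a stack of pieces is replaced by building the dict with dict(knowledge) and a single re.sub(r'\(([^)]*)\)', ...) call that lets the regex engine find and substitute every bracketed key.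
import Mathlib
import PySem

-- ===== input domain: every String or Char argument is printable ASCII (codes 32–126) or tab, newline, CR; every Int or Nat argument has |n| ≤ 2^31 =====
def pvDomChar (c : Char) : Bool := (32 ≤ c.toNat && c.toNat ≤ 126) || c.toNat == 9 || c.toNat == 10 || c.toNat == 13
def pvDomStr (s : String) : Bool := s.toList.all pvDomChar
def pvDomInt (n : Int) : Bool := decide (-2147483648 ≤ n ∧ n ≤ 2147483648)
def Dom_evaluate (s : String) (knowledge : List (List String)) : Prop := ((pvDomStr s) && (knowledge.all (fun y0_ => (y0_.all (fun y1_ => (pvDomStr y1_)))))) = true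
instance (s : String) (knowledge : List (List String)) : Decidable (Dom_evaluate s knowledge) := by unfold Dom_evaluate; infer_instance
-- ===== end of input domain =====

-- B replaces A's hand-written index walk with a single regex substitution (re.sub of \(([^)]*)\));
-- objective: idiomatic. Return-value equivalence only; neither program mutates its arguments.

-- ===== PORT A =====
-- inner while loop: collect chars into key until ')' (none = IndexError: ran off the end)
def evalKeyLoop : List Char → List Char → Option (List Char × List Char)
  | [], _ => none
  | c :: rest, key => if c = ')' then some (key, rest) else evalKeyLoop rest (key ++ [c])

-- outer while loop over the string, accumulating the stack of pieces
-- (fuel = remaining string length makes the recursion structural; each step consumes ≥ 1 char)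
def evalLoop (km : PySem.Dict String String) : Nat → List Char → List String → List String
  | 0, _, stack => stack
  | _ + 1, [], stack => stack
  | fuel + 1, c :: rest, stack =>
    if c = '(' then
      match evalKeyLoop rest [] with
      | some kr =>
        evalLoop km fuel kr.2
          (stack ++ [match km.get? (String.ofList kr.1) with | some v => v | none => "?"])
      | none => stack   -- Python raises IndexError here (excluded by Pre_)
    else
      evalLoop km fuel rest (stack ++ [String.ofList [c]])

def evaluate (s : String) (knowledge : List (List String)) : String :=
  let km : PySem.Dict String String :=
    knowledge.foldl (fun d l => match l with | [k, v] => d.insert k v | _ => d) PySem.Dict.empty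
  PySem.Str.join "" (evalLoop km s.toList.length s.toList [])

-- ===== PORT B =====
-- the regex engine's match of ([^)]*)\) : chars up to the first ')' (none = no ')', no match)
def findClose : List Char → Option (List Char × List Char)
  | [] => none
  | c :: rest =>
    if c = ')' then some ([], rest)
    else match findClose rest with
      | some kr => some (c :: kr.1, kr.2)
      | none => none

-- re.sub scanning left to right: substitute each match, emit unmatched chars as-is
def reSub (km : PySem.Dict String String) : Nat → List Char → List Char
  | 0, _ => []
  | _ + 1, [] => []
  | fuel + 1, c :: rest =>
    if c = '(' then
      match findClose rest with
      | some kr => (km.getD (String.ofList kr.1) "?").toList ++ reSub km fuel kr.2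
      | none => c :: reSub km fuel rest
    else c :: reSub km fuel rest

def evaluate_alt (s : String) (knowledge : List (List String)) : String :=
  let km : PySem.Dict String String :=
    knowledge.foldl (fun d l => if l.length = 2 then d.insert l[0]! l[1]! else d) PySem.Dict.empty
  String.ofList (reSub km s.toList.length s.toList)

-- ===== PRECONDITION & SPEC =====
-- each '(' in the string is followed by some later ')'
def parensClosed : List Char → Bool
  | [] => true
  | c :: r => (c != '(' || r.contains ')') && parensClosed r

-- Pre_ excludes exactly the inputs where Python A raises: a knowledge entry that is not a
-- 2-element pair (ValueError on unpacking) or a '(' with no later ')' (IndexError in the inner scan).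
def Pre_evaluate (s : String) (knowledge : List (List String)) : Prop :=
  (∀ l ∈ knowledge, l.length = 2) ∧ parensClosed s.toList = true
instance (s : String) (knowledge : List (List String)) : Decidable (Pre_evaluate s knowledge) := by
  unfold Pre_evaluate; infer_instance

def pvWitness_evaluate : String × List (List String) := ("x(a)y(b)()", [["a", "yes"], ["c", "no"]])

def Spec_evaluate (s : String) (knowledge : List (List String)) (out : String) : Prop := out = evaluate_alt s knowledge
instance (s : String) (knowledge : List (List String)) (out : String) : Decidable (Spec_evaluate s knowledge out) := by unfold Spec_evaluate; infer_instance

-- ===== CLAIM (what is proved, stated in full; the proofs are below) =====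
def Claim_equal_evaluate : Prop := ∀ (s : String) (knowledge : List (List String)), Dom_evaluate s knowledge → Pre_evaluate s knowledge → Spec_evaluate s knowledge (evaluate s knowledge)

-- ===== LEMMAS AND PROOFS =====

theorem findClose_lt (l : List Char) (kr : List Char × List Char)
    (h : findClose l = some kr) : kr.2.length < l.length := by
  induction l generalizing kr with
  | nil => simp [findClose] at h
  | cons c rest ih =>
    simp only [findClose] at h
    by_cases hc : c = ')'
    · simp [hc] at h
      simp [← h]
    · simp only [hc, if_false] at h
      cases hfc : findClose rest with
      | none => simp [hfc] at h
      | some kr' =>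
        simp [hfc] at h
        have := ih _ hfc
        simp [← h]
        omega

theorem join0_cons (x : List Char) (xs : List (List Char)) :
    PySem.Chars.join [] (x :: xs) = x ++ PySem.Chars.join [] xs := by
  cases xs with
  | nil => simp [PySem.Chars.join_singleton, PySem.Chars.join_nil]
  | cons y ys => rw [PySem.Chars.join_cons_cons]; simp

theorem join0_snoc (l : List (List Char)) (x : List Char) :
    PySem.Chars.join [] (l ++ [x]) = PySem.Chars.join [] l ++ x := by
  induction l with
  | nil => simp [PySem.Chars.join_singleton, PySem.Chars.join_nil]
  | cons y ys ih => rw [List.cons_append, join0_cons, join0_cons, ih, List.append_assoc]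

theorem evalKeyLoop_eq_findClose (l : List Char) (key : List Char) :
    evalKeyLoop l key = (findClose l).map (fun kr => (key ++ kr.1, kr.2)) := by
  induction l generalizing key with
  | nil => simp [evalKeyLoop, findClose]
  | cons c rest ih =>
    simp only [evalKeyLoop, findClose]
    by_cases hc : c = ')'
    · simp [hc]
    · simp only [hc, if_false]
      rw [ih]
      cases findClose rest <;> simp

theorem findClose_none_iff (l : List Char) : findClose l = none ↔ ')' ∉ l := by
  induction l with
  | nil => simp [findClose]
  | cons c rest ih =>
    simp only [findClose]
    by_cases hc : c = ')'
    · simp [hc]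
    · cases h : findClose rest <;>
        simp [hc, h, List.mem_cons, ← ih, Ne.symm hc]

theorem findClose_decomp (l : List Char) (kr : List Char × List Char)
    (h : findClose l = some kr) : l = kr.1 ++ ')' :: kr.2 := by
  induction l generalizing kr with
  | nil => simp [findClose] at h
  | cons c rest ih =>
    simp only [findClose] at h
    by_cases hc : c = ')'
    · simp [hc] at h; simp [← h, hc]
    · simp only [hc, if_false] at h
      cases hfc : findClose rest with
      | none => simp [hfc] at h
      | some kr' =>
        simp [hfc] at h
        have := ih _ hfc
        simp [← h, this]

theorem parensClosed_append (a b : List Char) (h : parensClosed (a ++ b) = true) :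
    parensClosed b = true := by
  induction a with
  | nil => exact h
  | cons c r ih =>
    simp only [List.cons_append, parensClosed, Bool.and_eq_true] at h
    exact ih h.2

theorem evalLoop_reSub (km : PySem.Dict String String) :
    ∀ (fuel : Nat) (cs : List Char), cs.length ≤ fuel → parensClosed cs = true →
    ∀ stack : List String,
      PySem.Chars.join [] ((evalLoop km fuel cs stack).map String.toList)
        = PySem.Chars.join [] (stack.map String.toList) ++ reSub km fuel cs := by
  intro fuel
  induction fuel with
  | zero =>
    intro cs hlen _ stack
    have : cs = [] := List.eq_nil_of_length_eq_zero (Nat.le_zero.mp hlen)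
    subst this
    simp [evalLoop, reSub]
  | succ n ih =>
    intro cs hlen hok stack
    cases cs with
    | nil => simp [evalLoop, reSub]
    | cons c rest =>
      have hlen' : rest.length ≤ n := by simp [List.length_cons] at hlen; omega
      simp only [parensClosed, Bool.and_eq_true] at hok
      by_cases hc : c = '('
      · -- bracket case: a ')' exists in rest, so findClose succeeds
        have hmem : ')' ∈ rest := by
          have h1 := hok.1
          simp [hc] at h1
          exact h1
        cases hfc : findClose rest with
        | none => exact absurd ((findClose_none_iff rest).mp hfc) (by simp [hmem])
        | some kr =>
          have hkey : evalKeyLoop rest [] = some (kr.1, kr.2) := by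
            rw [evalKeyLoop_eq_findClose, hfc]; simp
          have hdec := findClose_decomp rest kr hfc
          have hok2 : parensClosed kr.2 = true := by
            have := parensClosed_append kr.1 (')' :: kr.2) (hdec ▸ hok.2)
            simpa [parensClosed] using this
          have hlen2 : kr.2.length ≤ n :=
            Nat.le_trans (Nat.le_of_lt (findClose_lt rest kr hfc)) hlen'
          rw [show evalLoop km (n + 1) (c :: rest) stack
              = evalLoop km n kr.2
                  (stack ++ [match km.get? (String.ofList kr.1) with | some v => v | none => "?"])
            by rw [evalLoop]; simp only [hc, if_true]; rw [hkey]]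
          rw [ih kr.2 hlen2 hok2]
          rw [show reSub km (n + 1) (c :: rest)
              = (km.getD (String.ofList kr.1) "?").toList ++ reSub km n kr.2
            by rw [reSub]; simp only [hc, if_true]; rw [hfc]]
          rw [List.map_append, List.map_cons, List.map_nil, join0_snoc]
          have hq : ("?" : String).toList = ['?'] := rfl
          cases hg : km.get? (String.ofList kr.1) <;>
            simp [PySem.Dict.getD, hg, hq, List.append_assoc]
      · -- ordinary character
        rw [show evalLoop km (n + 1) (c :: rest) stack
            = evalLoop km n rest (stack ++ [String.ofList [c]])
          by rw [evalLoop]; simp [hc]]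
        rw [ih rest hlen' hok.2]
        rw [show reSub km (n + 1) (c :: rest) = c :: reSub km n rest by rw [reSub]; simp [hc]]
        rw [List.map_append, List.map_cons, List.map_nil, join0_snoc]
        simp [List.append_assoc]

-- ===== VERDICT (by name: the statement is the Claim_ definition above) =====
theorem evaluate_spec : Claim_equal_evaluate := by
  intro s knowledge _ hpre
  unfold Spec_evaluate evaluate evaluate_alt
  have hfun : (fun (d : PySem.Dict String String) (l : List String) =>
        match l with | [k, v] => d.insert k v | _ => d)
      = (fun (d : PySem.Dict String String) (l : List String) =>
        if l.length = 2 then d.insert l[0]! l[1]! else d) := by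
    funext d l
    match l with
    | [] => simp
    | [k] => simp
    | [k, v] => simp
    | k :: v :: x :: rest => rw [if_neg (by simp)]
  rw [hfun]
  apply String.toList_inj.mp
  rw [PySem.Str.toList_join]
  have h := evalLoop_reSub
    (knowledge.foldl (fun d l => if l.length = 2 then d.insert l[0]! l[1]! else d) PySem.Dict.empty)
    s.toList.length s.toList le_rfl hpre.2 []
  simpa [PySem.Chars.join_nil] using h
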